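-- pv_equiv track=rewrite | github.com/level99/Hubitat-VeSync | tests/lint_rules/groovy_lite.py | strip_block_comments
-- ===== SOURCE A (Python) =====
-- def strip_block_comments(source):
--     """
--     Remove /* ... */ block comments from source text. Returns cleaned text.
--     Preserves line count by replacing comment content with whitespace.
--     """
--     result = []
--     i = 0
--     in_block = False
--     while i < len(source):
--         if not in_block and source[i:i+2] == '/*':
--             in_block = True
--             result.append('  ')
--             i += 2
--         elif in_block and source[i:i+2] == '*/':
--             in_block = False
--             result.append('  ')
--             i += 2
--         elif in_block:
--             # preserve newlines so line numbers stay accurate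
--             result.append('\n' if source[i] == '\n' else ' ')
--             i += 1
--         else:
--             result.append(source[i])
--             i += 1
--     return ''.join(result)
-- ===== SOURCE B (Python) =====
-- def strip_block_comments(source):
--     """
--     Remove /* ... */ block comments from source text. Returns cleaned text.
--     Preserves line count by replacing comment content with whitespace.
--     """
--     out = []
--     i = 0
--     n = len(source)
--     while True:
--         j = source.find('/*', i)
--         if j == -1:
--             out.append(source[i:])
--             break
--         out.append(source[i:j])
--         k = source.find('*/', j + 2)
--         end = n if k == -1 else k + 2
--         out.append(''.join('\n' if c == '\n' else ' ' for c in source[j:end]))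
--         if k == -1:
--             break
--         i = end
--     return ''.join(out)
-- ===== Notes on version B (the rewrite author's own statement) =====
-- stated objective: faster
-- what changed: Replaces the per-character in_block state machine with a scan that uses str.find to jump from each comment opener to its matching closer, copying non-comment text as whole slices and blanking each full comment span at once (a dangling opener blanks to end of text, like A's sticky state).
import Mathlib
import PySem

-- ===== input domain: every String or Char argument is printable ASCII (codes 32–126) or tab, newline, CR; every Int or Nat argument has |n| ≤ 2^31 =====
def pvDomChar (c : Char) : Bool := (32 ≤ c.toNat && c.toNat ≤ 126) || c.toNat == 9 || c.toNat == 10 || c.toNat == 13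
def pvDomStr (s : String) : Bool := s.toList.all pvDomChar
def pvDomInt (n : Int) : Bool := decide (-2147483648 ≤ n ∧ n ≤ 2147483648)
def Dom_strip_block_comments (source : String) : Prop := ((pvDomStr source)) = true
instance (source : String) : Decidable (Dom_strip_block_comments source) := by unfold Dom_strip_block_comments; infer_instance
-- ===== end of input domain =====

-- B replaces A's per-character in_block state machine by a scan that jumps from one
-- comment delimiter to the next (str.find) and blanks whole comment
-- spans at once (intended as a constant-factor speedup). Return values proved equal.

-- ===== PORT A =====
-- Port of A: the index loop with 2-char lookahead becomes the obvious structural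
-- recursion over the remaining characters, same `in_block` state, same branch order.
def stripAGo : Bool → List Char → List Char
  | false, '/' :: '*' :: rest => ' ' :: ' ' :: stripAGo true rest
  | true,  '*' :: '/' :: rest => ' ' :: ' ' :: stripAGo false rest
  | true,  c :: rest => (if c = '\n' then '\n' else ' ') :: stripAGo true rest
  | false, c :: rest => c :: stripAGo false rest
  | _, [] => []

def strip_block_comments (source : String) : String :=
  String.mk (stripAGo false source.toList)

-- ===== PORT B =====
-- Port of B: `splitOpen` is source.find('/*', i) (the prefix before the first "/*"
-- and the tail after it), `splitClose` is source.find('*/', j+2); each found comment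
-- span is blanked in one go, then B recurses on the tail after "*/".
def splitOpen : List Char → Option (List Char × List Char)
  | [] => none
  | '/' :: '*' :: rest => some ([], rest)
  | c :: rest => (splitOpen rest).map (fun p => (c :: p.1, p.2))

def splitClose : List Char → Option (List Char × List Char)
  | [] => none
  | '*' :: '/' :: rest => some ([], rest)
  | c :: rest => (splitClose rest).map (fun p => (c :: p.1, p.2))

def blank (cs : List Char) : List Char :=
  cs.map (fun c => if c = '\n' then '\n' else ' ')

-- needed by stripBGo's termination proof
theorem splitOpen_cons (c : Char) (rest : List Char)
    (hne : ∀ r, c = '/' → rest = '*' :: r → False) :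
    splitOpen (c :: rest) = (splitOpen rest).map (fun p => (c :: p.1, p.2)) := by
  rw [splitOpen.eq_def]; split
  · rename_i x heq; exact absurd heq (by simp)
  · rename_i x r' heq; injection heq with h1 h2; exact (hne r' h1 h2).elim
  · rename_i x c' r' hx heq; injection heq with h1 h2; subst h1; subst h2; rfl

theorem splitClose_cons (c : Char) (rest : List Char)
    (hne : ∀ r, c = '*' → rest = '/' :: r → False) :
    splitClose (c :: rest) = (splitClose rest).map (fun p => (c :: p.1, p.2)) := by
  rw [splitClose.eq_def]; split
  · rename_i x heq; exact absurd heq (by simp)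
  · rename_i x r' heq; injection heq with h1 h2; exact (hne r' h1 h2).elim
  · rename_i x c' r' hx heq; injection heq with h1 h2; subst h1; subst h2; rfl

theorem splitOpen_decomp : ∀ cs pre rest, splitOpen cs = some (pre, rest) →
    cs = pre ++ '/' :: '*' :: rest := by
  intro cs
  induction cs using splitOpen.induct with
  | case1 => intro _ _ h; simp [splitOpen] at h
  | case2 rest =>
    intro pre r h
    rw [show splitOpen ('/' :: '*' :: rest) = some ([], rest) from rfl] at h
    injection h with h; injection h with h1 h2; subst h1; subst h2; rfl
  | case3 c rest hne ih =>
    intro pre r h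
    rw [splitOpen_cons c rest hne] at h
    cases hr : splitOpen rest with
    | none => rw [hr] at h; simp at h
    | some pq =>
      obtain ⟨p, q⟩ := pq
      rw [hr] at h
      simp only [Option.map_some, Option.some.injEq, Prod.mk.injEq] at h
      obtain ⟨h1, h2⟩ := h
      subst h1; subst h2
      simpa using ih p q hr

theorem splitClose_decomp : ∀ cs pre rest, splitClose cs = some (pre, rest) →
    cs = pre ++ '*' :: '/' :: rest := by
  intro cs
  induction cs using splitClose.induct with
  | case1 => intro _ _ h; simp [splitClose] at h
  | case2 rest =>
    intro pre r h
    rw [show splitClose ('*' :: '/' :: rest) = some ([], rest) from rfl] at h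
    injection h with h; injection h with h1 h2; subst h1; subst h2; rfl
  | case3 c rest hne ih =>
    intro pre r h
    rw [splitClose_cons c rest hne] at h
    cases hr : splitClose rest with
    | none => rw [hr] at h; simp at h
    | some pq =>
      obtain ⟨p, q⟩ := pq
      rw [hr] at h
      simp only [Option.map_some, Option.some.injEq, Prod.mk.injEq] at h
      obtain ⟨h1, h2⟩ := h
      subst h1; subst h2
      simpa using ih p q hr

def stripBGo (cs : List Char) : List Char :=
  match ho : splitOpen cs with
  | none => cs
  | some (pre, rest) =>
    match hc : splitClose rest with
    | none => pre ++ blank ('/' :: '*' :: rest)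
    | some (mid, rest2) =>
      pre ++ blank ('/' :: '*' :: (mid ++ ['*', '/'])) ++ stripBGo rest2
termination_by cs.length
decreasing_by
  have h1 := splitOpen_decomp cs pre rest ho
  have h2 := splitClose_decomp rest mid rest2 hc
  subst h1; subst h2; simp; omega

def strip_block_comments_alt (source : String) : String :=
  String.mk (stripBGo source.toList)

-- ===== PRECONDITION & SPEC =====
def Spec_strip_block_comments (source : String) (out : String) : Prop := out = strip_block_comments_alt source
instance (source : String) (out : String) : Decidable (Spec_strip_block_comments source out) := by unfold Spec_strip_block_comments; infer_instance

-- ===== CLAIM (what is proved, stated in full; the proofs are below) =====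
def Claim_equal_strip_block_comments : Prop := ∀ (source : String), Dom_strip_block_comments source → Spec_strip_block_comments source (strip_block_comments source)

-- ===== LEMMAS AND PROOFS =====

-- what B does after an opening "/*": blank up to and including the close, recurse
def handleIn (cs : List Char) : List Char :=
  match splitClose cs with
  | none => blank cs
  | some (mid, rest2) => blank mid ++ ' ' :: ' ' :: stripBGo rest2

theorem stripA_true_cons (c : Char) (rest : List Char)
    (hne : ∀ r, c = '*' → rest = '/' :: r → False) :
    stripAGo true (c :: rest) = (if c = '\n' then '\n' else ' ') :: stripAGo true rest := by
  rw [stripAGo.eq_def]; split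
  · rename_i x1 x2 r' h1 h2; exact Bool.noConfusion h1
  · rename_i x1 x2 r' h1 h2; injection h2 with e1 e2; exact (hne r' e1 e2).elim
  · rename_i x1 x2 c' r' hx h1 h2; injection h2 with e1 e2; subst e1; subst e2; rfl
  · rename_i x1 x2 c' r' hx h1 h2; exact Bool.noConfusion h1
  · rename_i x1 x2 h; exact absurd h (by simp)

theorem stripA_false_cons (c : Char) (rest : List Char)
    (hne : ∀ r, c = '/' → rest = '*' :: r → False) :
    stripAGo false (c :: rest) = c :: stripAGo false rest := by
  rw [stripAGo.eq_def]; split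
  · rename_i x1 x2 r' h1 h2; injection h2 with e1 e2; exact (hne r' e1 e2).elim
  · rename_i x1 x2 r' h1 h2; exact Bool.noConfusion h1
  · rename_i x1 x2 c' r' hx h1 h2; exact Bool.noConfusion h1
  · rename_i x1 x2 c' r' hx h1 h2; injection h2 with e1 e2; subst e1; subst e2; rfl
  · rename_i x1 x2 h; exact absurd h (by simp)

theorem stripBGo_none (cs : List Char) (h : splitOpen cs = none) : stripBGo cs = cs := by
  rw [stripBGo.eq_def]; split
  · rfl
  · next pre rest ho => rw [h] at ho; cases ho

theorem blank_append (xs ys : List Char) : blank (xs ++ ys) = blank xs ++ blank ys := by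
  simp [blank]

theorem stripBGo_some (cs pre rest : List Char) (h : splitOpen cs = some (pre, rest)) :
    stripBGo cs = pre ++ ' ' :: ' ' :: handleIn rest := by
  rw [stripBGo.eq_def]
  split
  · next ho => rw [h] at ho; cases ho
  · next pre' rest' ho =>
    rw [h] at ho; injection ho with ho; injection ho with h1 h2
    subst h1; subst h2
    unfold handleIn
    split
    · next hc => rw [hc]; simp [blank]
    · next mid rest2 hc => rw [hc]; simp [blank_append, blank]

theorem stripA_eq (inb : Bool) (cs : List Char) :
    stripAGo inb cs = cond inb (handleIn cs) (stripBGo cs) := by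
  induction inb, cs using stripAGo.induct with
  | case1 rest ih =>
    simp only [cond_true] at ih
    simp only [cond_false]
    rw [show stripAGo false ('/' :: '*' :: rest) = ' ' :: ' ' :: stripAGo true rest from rfl,
        stripBGo_some ('/' :: '*' :: rest) [] rest rfl, ih]
    simp
  | case2 rest ih =>
    simp only [cond_false] at ih
    simp only [cond_true]
    rw [show stripAGo true ('*' :: '/' :: rest) = ' ' :: ' ' :: stripAGo false rest from rfl, ih]
    rw [show handleIn ('*' :: '/' :: rest) = ' ' :: ' ' :: stripBGo rest from rfl]
  | case3 c rest hne ih =>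
    simp only [cond_true] at ih ⊢
    rw [stripA_true_cons c rest hne, ih]
    unfold handleIn
    rw [splitClose_cons c rest hne]
    cases hr : splitClose rest with
    | none => simp [blank]
    | some pq =>
      obtain ⟨mid, rest2⟩ := pq
      simp [blank]
  | case4 c rest hne ih =>
    simp only [cond_false] at ih ⊢
    rw [stripA_false_cons c rest hne, ih]
    cases hr : splitOpen rest with
    | none =>
      rw [stripBGo_none rest hr,
          stripBGo_none (c :: rest) (by simp [splitOpen_cons c rest hne, hr])]
    | some pq =>
      obtain ⟨pre, r⟩ := pq
      rw [stripBGo_some rest pre r hr,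
          stripBGo_some (c :: rest) (c :: pre) r (by simp [splitOpen_cons c rest hne, hr])]
      simp
  | case5 b =>
    cases b
    · simp only [cond_false]
      rw [stripBGo_none [] rfl]
      rfl
    · rfl

-- ===== VERDICT (by name: the statement is the Claim_ definition above) =====
theorem strip_block_comments_spec : Claim_equal_strip_block_comments := by
  intro source _
  unfold Spec_strip_block_comments strip_block_comments strip_block_comments_alt
  exact congrArg String.mk (stripA_eq false source.toList)
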